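-- pv_equiv track=rewrite | github.com/Sophoca/PS | 프로그래머스/기능개발.py | calc_days
-- ===== SOURCE A (Python) =====
-- def calc_days(days, answer=None):
--     if len(days) == 0:
--         return answer
--     elif answer is None:
--         answer = []
--     count = 0
--     days = list(map(lambda x: max(0, x - days[0]), days))
--     for day in days:
--         if day == 0:
--             count += 1
--         else:
--             break
--     answer.append(count)
--     calc_days(days[count:], answer)
--
--     return answer
-- ===== SOURCE B (Python) =====
-- # Single linear pass: keep the current release's trigger value as a threshold,
-- # count consecutive features not exceeding it (faster: O(n) vs A's O(n^2)).
-- # Like A, mutates a provided `answer` list in place.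
-- def calc_days(days, answer=None):
--     if not days:
--         return answer
--     if answer is None:
--         answer = []
--     t = days[0]
--     count = 0
--     for x in days:
--         if x <= t:
--             count += 1
--         else:
--             answer.append(count)
--             t = x
--             count = 1
--     answer.append(count)
--     return answer
-- ===== Notes on version B (the rewrite author's own statement) =====
-- stated objective: faster
-- what changed: Replaced A's recursive rebuild (re-mapping the whole remaining list with a clamped subtraction and recursing on the suffix each release) by a single linear scan that keeps the current release's original trigger value as a threshold and counts consecutive elements not exceeding it.
import Mathlib
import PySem

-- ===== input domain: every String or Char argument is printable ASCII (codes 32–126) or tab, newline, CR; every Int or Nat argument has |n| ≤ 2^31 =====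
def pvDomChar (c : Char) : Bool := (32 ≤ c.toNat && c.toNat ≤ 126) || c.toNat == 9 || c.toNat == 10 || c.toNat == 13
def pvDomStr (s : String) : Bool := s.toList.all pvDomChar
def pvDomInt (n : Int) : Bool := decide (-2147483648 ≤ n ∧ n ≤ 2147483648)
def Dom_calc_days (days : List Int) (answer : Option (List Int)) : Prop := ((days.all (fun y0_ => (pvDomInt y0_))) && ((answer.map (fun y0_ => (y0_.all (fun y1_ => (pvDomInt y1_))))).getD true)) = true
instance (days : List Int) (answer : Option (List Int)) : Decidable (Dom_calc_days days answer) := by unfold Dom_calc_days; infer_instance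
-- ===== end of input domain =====

-- B replaces A's quadratic recursive rebuild by one linear threshold scan; equal return value everywhere
-- (A mutates a provided `answer` list in place; the equivalence proved here is about the RETURN value).

-- ===== PORT A =====
-- number of leading zeros (the for-loop with break, counting `day == 0`)
def leadZeros : List Int → Nat
  | [] => 0
  | d :: rest => if d = 0 then leadZeros rest + 1 else 0

-- the recursive core of A: `days = list(map(lambda x: max(0, x - days[0]), days))`,
-- count leading zeros, append, recurse on `days[count:]`
def calcA_go : List Int → List Int → List Int
  | [], acc => acc
  | d0 :: rest, acc =>
    calcA_go (((d0 :: rest).map (fun x => max 0 (x - d0))).drop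
                (leadZeros ((d0 :: rest).map (fun x => max 0 (x - d0)))))
             (acc ++ [(leadZeros ((d0 :: rest).map (fun x => max 0 (x - d0))) : Int)])
  termination_by l _ => l.length
  decreasing_by
    simp [leadZeros]

def calc_days (days : List Int) (answer : Option (List Int)) : Option (List Int) :=
  if days.length = 0 then answer
  else
    match answer with
    | none => some (calcA_go days [])
    | some a => some (calcA_go days a)

-- ===== PORT B =====
-- one pass: threshold t = current release's trigger, count consecutive x ≤ t
def calcB_go : List Int → Int → Nat → List Int → List Int
  | [], _, count, acc => acc ++ [(count : Int)]
  | x :: rest, t, count, acc =>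
    if x ≤ t then calcB_go rest t (count + 1) acc
    else calcB_go rest x 1 (acc ++ [(count : Int)])

def calc_days_alt (days : List Int) (answer : Option (List Int)) : Option (List Int) :=
  match days with
  | [] => answer
  | d0 :: rest => some (calcB_go (d0 :: rest) d0 0 (answer.getD []))

-- ===== PRECONDITION & SPEC =====
def Spec_calc_days (days : List Int) (answer : Option (List Int)) (out : Option (List Int)) : Prop := out = calc_days_alt days answer
instance (days : List Int) (answer : Option (List Int)) (out : Option (List Int)) : Decidable (Spec_calc_days days answer out) := by unfold Spec_calc_days; infer_instance

-- ===== CLAIM (what is proved, stated in full; the proofs are below) =====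
def Claim_equal_calc_days : Prop := ∀ (days : List Int) (answer : Option (List Int)), Dom_calc_days days answer → Spec_calc_days days answer (calc_days days answer)

-- ===== LEMMAS AND PROOFS =====

-- number of leading elements ≤ t (what B's counter counts within one release)
def bcnt (t : Int) : List Int → Nat
  | [] => 0
  | x :: rest => if x ≤ t then bcnt t rest + 1 else 0

theorem calcA_go_cons (d0 : Int) (rest acc : List Int) :
    calcA_go (d0 :: rest) acc =
      calcA_go (((d0 :: rest).map (fun x => max 0 (x - d0))).drop
                  (leadZeros ((d0 :: rest).map (fun x => max 0 (x - d0)))))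
               (acc ++ [(leadZeros ((d0 :: rest).map (fun x => max 0 (x - d0))) : Int)]) := by
  conv_lhs => rw [calcA_go.eq_def]

theorem calcA_go_nil (acc : List Int) : calcA_go [] acc = acc := by
  rw [calcA_go.eq_def]

theorem map_clamp_clamp (t u : Int) (h : t ≤ u) (xs : List Int) :
    (xs.map (fun x => max 0 (x - t))).map (fun v => max 0 (v - (u - t)))
      = xs.map (fun x => max 0 (x - u)) := by
  rw [List.map_map]
  refine List.map_congr_left (fun a _ => ?_)
  simp only [Function.comp_apply]
  omega

theorem leadZeros_map (t : Int) (xs : List Int) :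
    leadZeros (xs.map (fun x => max 0 (x - t))) = bcnt t xs := by
  induction xs with
  | nil => rfl
  | cons x rest ih =>
    simp only [List.map_cons, leadZeros, bcnt, ih]
    by_cases hx : x ≤ t
    · rw [if_pos (by omega), if_pos hx]
    · rw [if_neg (by omega), if_neg hx]

theorem bcnt_drop (t : Int) (xs : List Int) :
    ∀ y ys, xs.drop (bcnt t xs) = y :: ys → t < y := by
  induction xs with
  | nil => intro y ys h; simp at h
  | cons x rest ih =>
    intro y ys h
    by_cases hx : x ≤ t
    · simp only [bcnt, if_pos hx, List.drop_succ_cons] at h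
      exact ih y ys h
    · simp only [bcnt, if_neg hx, List.drop_zero] at h
      cases h
      omega

theorem calcB_go_shape (xs : List Int) : ∀ (t : Int) (c : Nat) (acc : List Int),
    calcB_go xs t c acc =
      (match xs.drop (bcnt t xs) with
       | [] => acc ++ [((c + bcnt t xs : Nat) : Int)]
       | y :: ys => calcB_go ys y 1 (acc ++ [((c + bcnt t xs : Nat) : Int)])) := by
  induction xs with
  | nil => intro t c acc; simp [calcB_go, bcnt]
  | cons x rest ih =>
    intro t c acc
    by_cases hx : x ≤ t
    · simp only [calcB_go, if_pos hx, bcnt, List.drop_succ_cons, ih]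
      have : c + 1 + bcnt t rest = c + (bcnt t rest + 1) := by omega
      rw [this]
    · simp only [calcB_go, if_neg hx, bcnt, List.drop_zero]
      simp

theorem bcnt_pos (t h : Int) (rest : List Int) (hh : h ≤ t) :
    1 ≤ bcnt t (h :: rest) := by
  simp [bcnt, if_pos hh]

-- unfolding calcA_go on a list of the form xs.map (clamp t) whose head is ≤ t
theorem calcA_go_mapped (t h : Int) (rest acc : List Int) (hh : h ≤ t) :
    calcA_go ((h :: rest).map (fun x => max 0 (x - t))) acc =
      calcA_go (((h :: rest).drop (bcnt t (h :: rest))).map (fun x => max 0 (x - t)))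
               (acc ++ [((bcnt t (h :: rest) : Nat) : Int)]) := by
  have hh0 : max 0 (h - t) = 0 := by omega
  have hmap : ((h :: rest).map (fun x => max 0 (x - t))).map (fun v => max 0 (v - (t - t)))
      = (h :: rest).map (fun x => max 0 (x - t)) := map_clamp_clamp t t le_rfl _
  have key : calcA_go (0 :: rest.map (fun x => max 0 (x - t))) acc =
      calcA_go ((((h :: rest).map (fun x => max 0 (x - t))).map (fun v => max 0 (v - 0))).drop
        (leadZeros (((h :: rest).map (fun x => max 0 (x - t))).map (fun v => max 0 (v - 0)))))
        (acc ++ [(leadZeros (((h :: rest).map (fun x => max 0 (x - t))).map (fun v => max 0 (v - 0))) : Int)]) := by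
    have := calcA_go_cons 0 (rest.map (fun x => max 0 (x - t))) acc
    simpa only [sub_zero, List.map_cons, hh0] using this
  have h0 : (fun v : Int => max 0 (v - 0)) = (fun v : Int => max 0 (v - (t - t))) := by
    funext v; rw [sub_self]
  rw [show (h :: rest).map (fun x => max 0 (x - t)) = 0 :: rest.map (fun x => max 0 (x - t)) by
        simp [hh0],
      key, h0, hmap]
  rw [leadZeros_map, List.map_drop]

theorem main_lemma : ∀ (n : Nat) (h : Int) (rest : List Int) (t : Int) (acc : List Int),
    (h :: rest).length ≤ n → h ≤ t →
    calcA_go ((h :: rest).map (fun x => max 0 (x - t))) acc = calcB_go (h :: rest) t 0 acc := by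
  intro n
  induction n with
  | zero => intro h rest t acc hlen; simp at hlen
  | succ n ih =>
    intro h rest t acc hlen hht
    rw [calcA_go_mapped t h rest acc hht, calcB_go_shape]
    simp only [Nat.zero_add]
    cases hdrop : (h :: rest).drop (bcnt t (h :: rest)) with
    | nil =>
      simp [calcA_go_nil]
    | cons y ys =>
      have hty : t < y := bcnt_drop t (h :: rest) y ys hdrop
      have hc1 : 1 ≤ bcnt t (h :: rest) := bcnt_pos t h rest hht
      have hlen2 : (y :: ys).length ≤ n := by
        have := List.length_drop (l := (h :: rest)) (i := bcnt t (h :: rest))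
        rw [hdrop] at this
        simp only [List.length_cons] at *
        omega
      -- shift the subtraction base from t to y on the A side
      have shift : calcA_go ((y :: ys).map (fun x => max 0 (x - t))) (acc ++ [((bcnt t (h :: rest) : Nat) : Int)])
          = calcA_go ((y :: ys).map (fun x => max 0 (x - y))) (acc ++ [((bcnt t (h :: rest) : Nat) : Int)]) := by
        set acc' := acc ++ [((bcnt t (h :: rest) : Nat) : Int)]
        have hy : max 0 (y - t) = y - t := by omega
        have hcons : (y :: ys).map (fun x => max 0 (x - t)) = (y - t) :: ys.map (fun x => max 0 (x - t)) := by
          simp [hy]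
        have hcomp : ((y :: ys).map (fun x => max 0 (x - t))).map (fun v => max 0 (v - (y - t)))
            = (y :: ys).map (fun x => max 0 (x - y)) := map_clamp_clamp t y (le_of_lt hty) _
        have lhs_eq := calcA_go_cons (y - t) (ys.map (fun x => max 0 (x - t))) acc'
        rw [← hcons] at lhs_eq
        rw [lhs_eq, hcomp]
        rw [calcA_go_mapped y y ys acc' le_rfl, ← leadZeros_map y (y :: ys), List.map_drop]
      rw [shift]
      rw [ih y ys y _ hlen2 le_rfl]
      rw [calcB_go_shape (y :: ys) y 0]
      have hb : bcnt y (y :: ys) = bcnt y ys + 1 := by simp [bcnt]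
      rw [hb]
      simp only [List.drop_succ_cons, Nat.zero_add]
      rw [calcB_go_shape ys y 1]
      have hcc : bcnt y ys + 1 = 1 + bcnt y ys := by omega
      rw [hcc]

-- the top-level call: calcA_go days acc = calcA_go (days mapped by its own head) acc
theorem calcA_go_top (d0 : Int) (rest acc : List Int) :
    calcA_go (d0 :: rest) acc = calcA_go ((d0 :: rest).map (fun x => max 0 (x - d0))) acc := by
  rw [calcA_go_cons d0 rest acc, calcA_go_mapped d0 d0 rest acc le_rfl,
      ← leadZeros_map d0 (d0 :: rest), List.map_drop]

-- ===== VERDICT (by name: the statement is the Claim_ definition above) =====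
theorem calc_days_spec : Claim_equal_calc_days := by
  intro days answer _
  unfold Spec_calc_days calc_days calc_days_alt
  cases days with
  | nil => cases answer <;> simp
  | cons d0 rest =>
    have hmain := main_lemma (d0 :: rest).length d0 rest d0
    cases answer with
    | none =>
      simp only [List.length_cons, Option.getD_none]
      rw [if_neg (by omega), calcA_go_top, hmain [] le_rfl le_rfl]
    | some a =>
      simp only [List.length_cons, Option.getD_some]
      rw [if_neg (by omega), calcA_go_top, hmain a le_rfl le_rfl]
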